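-- pv_equiv track=rewrite | github.com/tsure-auto/shared_stuff | summarize_acl_v3_4d.py | merge_ranges_if_possible
-- ===== SOURCE A (Python) =====
-- from typing import Any, Dict, List, Optional, Tuple
--
-- def merge_ranges_if_possible(ranges: List[Tuple[int, int]]) -> Optional[Tuple[int, int]]:
--     if not ranges:
--         return None
--     rs = [(min(a, b), max(a, b)) for a, b in ranges]
--     rs.sort()
--     cur_start, cur_end = rs[0]
--     for a, b in rs[1:]:
--         if a <= cur_end + 1:
--             cur_end = max(cur_end, b)
--         else:
--             return None
--     return (cur_start, cur_end)
-- ===== SOURCE B (Python) =====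
-- from typing import List, Optional, Tuple
--
-- def merge_ranges_if_possible(ranges: List[Tuple[int, int]]) -> Optional[Tuple[int, int]]:
--     if not ranges:
--         return None
--     rs = [(min(a, b), max(a, b)) for a, b in ranges]
--     start = min(l for l, _ in rs)
--     end = max(h for _, h in rs)
--     # Contiguous iff every interval that stops short of `end` has its successor
--     # point hi+1 inside some interval; no sorting needed.
--     if all(hi >= end or any(l <= hi + 1 <= h for l, h in rs) for _, hi in rs):
--         return (start, end)
--     return None
-- ===== Notes on version B (the rewrite author's own statement) =====
-- stated objective: alternative
-- what changed: B drops the sort-and-sweep: it computes start/end as min/max of the normalized bounds and tests contiguity by checking, for every interval stopping short of end, that the point hi+1 lies inside some interval.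
import Mathlib
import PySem

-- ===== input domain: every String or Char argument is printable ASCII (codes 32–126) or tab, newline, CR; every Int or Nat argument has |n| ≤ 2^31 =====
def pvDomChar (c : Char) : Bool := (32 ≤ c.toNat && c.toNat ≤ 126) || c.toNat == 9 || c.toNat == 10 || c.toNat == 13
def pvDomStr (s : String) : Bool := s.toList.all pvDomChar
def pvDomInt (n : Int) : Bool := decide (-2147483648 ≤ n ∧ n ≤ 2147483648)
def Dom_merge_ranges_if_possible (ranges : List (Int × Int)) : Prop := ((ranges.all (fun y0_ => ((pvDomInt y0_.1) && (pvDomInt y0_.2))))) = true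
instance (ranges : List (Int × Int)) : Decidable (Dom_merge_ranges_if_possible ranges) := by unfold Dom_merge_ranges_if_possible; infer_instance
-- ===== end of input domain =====

-- ===== PORT A =====
-- B changes the algorithm (min/max bounds + per-interval successor-point check instead of
-- sort-and-sweep); same return value everywhere — objective: alternative decomposition.

-- the 'for a, b in rs[1:]: …' loop of A, with its early 'return None'
def pvGoA (ce : Int) : List (Int × Int) → Option Int
  | [] => some ce
  | p :: t => if p.1 ≤ ce + 1 then pvGoA (max ce p.2) t else none

def merge_ranges_if_possible (ranges : List (Int × Int)) : Option (Int × Int) :=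
  if ranges = [] then none
  else
    let rs := PySem.List.sorted2 (ranges.map (fun p => (min p.1 p.2, max p.1 p.2)))
                Prod.fst Prod.snd
    match rs with
    | [] => none
    | (cs, ce) :: rest =>
      match pvGoA ce rest with
      | none => none
      | some e => some (cs, e)

-- ===== PORT B =====
def merge_ranges_if_possible_alt (ranges : List (Int × Int)) : Option (Int × Int) :=
  if ranges = [] then none
  else
    let rs := ranges.map (fun p => (min p.1 p.2, max p.1 p.2))
    match PySem.List.min? (rs.map Prod.fst) (fun x => x),
          PySem.List.max? (rs.map Prod.snd) (fun x => x) with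
    | some s, some e =>
      if rs.all (fun p => e ≤ p.2 ||
           rs.any (fun q => decide (q.1 ≤ p.2 + 1) && decide (p.2 + 1 ≤ q.2))) then
        some (s, e)
      else
        none
    | _, _ => none

-- ===== PRECONDITION & SPEC =====
def Spec_merge_ranges_if_possible (ranges : List (Int × Int)) (out : Option (Int × Int)) : Prop := out = merge_ranges_if_possible_alt ranges
instance (ranges : List (Int × Int)) (out : Option (Int × Int)) : Decidable (Spec_merge_ranges_if_possible ranges out) := by unfold Spec_merge_ranges_if_possible; infer_instance

-- ===== CLAIM (what is proved, stated in full; the proofs are below) =====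
def Claim_equal_merge_ranges_if_possible : Prop := ∀ (ranges : List (Int × Int)), Dom_merge_ranges_if_possible ranges → Spec_merge_ranges_if_possible ranges (merge_ranges_if_possible ranges)

-- ===== LEMMAS AND PROOFS =====

-- strict lexicographic comparison Python uses on int pairs (the `before` of sorted2)
def pvLex (p q : Int × Int) : Bool :=
  decide (p.1 < q.1) || (!decide (q.1 < p.1) && decide (p.2 < q.2))

theorem pvLex_trans {p q r : Int × Int} (h1 : pvLex p q = true) (h2 : pvLex q r = true) :
    pvLex p r = true := by
  simp only [pvLex, Bool.or_eq_true, Bool.and_eq_true, Bool.not_eq_true', decide_eq_true_eq,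
    decide_eq_false_iff_not] at *
  omega

theorem pvLex_irrefl (p : Int × Int) : pvLex p p = false := by simp [pvLex]

theorem pvLex_asymm {p q : Int × Int} (h : pvLex p q = true) : pvLex q p = false := by
  rw [Bool.eq_false_iff]
  intro hqp
  have := pvLex_trans h hqp
  rw [pvLex_irrefl] at this
  exact Bool.false_ne_true this

theorem pvLex_fst_le {a b : Int × Int} (h : pvLex b a = false) : a.1 ≤ b.1 := by
  simp only [pvLex, Bool.or_eq_false_iff, decide_eq_false_iff_not] at h
  omega

theorem pv_insertBy_pw (x : Int × Int) (l : List (Int × Int))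
    (h : l.Pairwise (fun a b => pvLex b a = false)) :
    (PySem.List.insertBy pvLex x l).Pairwise (fun a b => pvLex b a = false) := by
  induction l with
  | nil => simp [PySem.List.insertBy]
  | cons y ys ih =>
    rcases List.pairwise_cons.mp h with ⟨hy, hys⟩
    by_cases hxy : pvLex x y = true
    · rw [show PySem.List.insertBy pvLex x (y :: ys) = x :: y :: ys by
        simp [PySem.List.insertBy, hxy]]
      refine List.pairwise_cons.mpr ⟨?_, h⟩
      intro z hz
      rcases List.mem_cons.mp hz with rfl | hz
      · exact pvLex_asymm hxy
      · by_contra hzx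
        have hzx' : pvLex z x = true := by
          cases hzt : pvLex z x with
          | false => exact absurd hzt hzx
          | true => rfl
        exact absurd (hy z hz) (by simp [pvLex_trans hzx' hxy])
    · have hxy' : pvLex x y = false := by
        cases hxt : pvLex x y with
        | false => rfl
        | true => exact absurd hxt hxy
      rw [show PySem.List.insertBy pvLex x (y :: ys) = y :: PySem.List.insertBy pvLex x ys by
        simp [PySem.List.insertBy, hxy']]
      refine List.pairwise_cons.mpr ⟨?_, ih hys⟩
      intro z hz
      rcases (PySem.List.mem_insertBy pvLex x z ys).mp hz with rfl | hz
      · exact hxy'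
      · exact hy z hz

theorem pv_foldl_insertBy_pw (xs : List (Int × Int)) (l : List (Int × Int))
    (h : l.Pairwise (fun a b => pvLex b a = false)) :
    (xs.foldl (fun acc x => PySem.List.insertBy pvLex x acc) l).Pairwise
      (fun a b => pvLex b a = false) := by
  induction xs generalizing l with
  | nil => exact h
  | cons x xs ih => exact ih _ (pv_insertBy_pw x l h)

theorem pv_sorted2_pw (xs : List (Int × Int)) :
    (PySem.List.sorted2 xs Prod.fst Prod.snd).Pairwise (fun a b => pvLex b a = false) := by
  have : PySem.List.sorted2 xs Prod.fst Prod.snd =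
      xs.foldl (fun acc x => PySem.List.insertBy pvLex x acc) [] := rfl
  rw [this]
  exact pv_foldl_insertBy_pw xs [] List.Pairwise.nil

-- A's sweep, on success: result is the running max of the second components, and every
-- point of (ce, c] is covered by some interval of the list.
theorem pvGoA_some (t : List (Int × Int)) : ∀ (ce c : Int), pvGoA ce t = some c →
    ce ≤ c ∧ c = t.foldl (fun m q => max m q.2) ce ∧
      ∀ x, ce < x → x ≤ c → ∃ q ∈ t, q.1 ≤ x ∧ x ≤ q.2 := by
  induction t with
  | nil => intro ce c h; simp [pvGoA] at h; subst h; refine ⟨le_refl _, rfl, ?_⟩; omega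
  | cons p t ih =>
    intro ce c h
    simp only [pvGoA] at h
    by_cases h1 : p.1 ≤ ce + 1
    · rw [if_pos h1] at h
      rcases ih (max ce p.2) c h with ⟨h2, h3, h4⟩
      refine ⟨le_trans (le_max_left _ _) h2, by simpa using h3, ?_⟩
      intro x hx1 hx2
      by_cases hx3 : x ≤ max ce p.2
      · exact ⟨p, List.mem_cons_self, by omega, by omega⟩
      · rcases h4 x (by omega) hx2 with ⟨q, hq, hq1, hq2⟩
        exact ⟨q, List.mem_cons_of_mem _ hq, hq1, hq2⟩
    · rw [if_neg h1] at h; exact absurd h (by simp)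

-- A's sweep, on failure: there is a gap point g (a successor hi+1 of one of the intervals,
-- or of the accumulator) missed by every interval of the (fst-sorted) list.
theorem pvGoA_none (t : List (Int × Int)) : ∀ (ce : Int), pvGoA ce t = none →
    t.Pairwise (fun a b => a.1 ≤ b.1) →
    ∃ g, ce < g ∧ (g = ce + 1 ∨ ∃ p ∈ t, g = p.2 + 1) ∧ (∃ q ∈ t, g < q.1) ∧
      ∀ q ∈ t, q.2 < g ∨ g < q.1 := by
  induction t with
  | nil => intro ce h; simp [pvGoA] at h
  | cons p t ih =>
    intro ce h hpw
    rcases List.pairwise_cons.mp hpw with ⟨hp, hpw'⟩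
    simp only [pvGoA] at h
    by_cases h1 : p.1 ≤ ce + 1
    · rw [if_pos h1] at h
      rcases ih (max ce p.2) h hpw' with ⟨g, hg1, hg2, ⟨q0, hq0, hq0'⟩, hg4⟩
      refine ⟨g, by omega, ?_, ⟨q0, List.mem_cons_of_mem _ hq0, hq0'⟩, ?_⟩
      · rcases hg2 with hg2 | ⟨p', hp', hp''⟩
        · by_cases hm : p.2 ≤ ce
          · left; omega
          · right; exact ⟨p, List.mem_cons_self, by omega⟩
        · right; exact ⟨p', List.mem_cons_of_mem _ hp', hp''⟩
      · intro q hq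
        rcases List.mem_cons.mp hq with rfl | hq
        · left; omega
        · exact hg4 q hq
    · rw [if_neg h1] at h
      refine ⟨ce + 1, by omega, Or.inl rfl, ⟨p, List.mem_cons_self, by omega⟩, ?_⟩
      intro q hq
      rcases List.mem_cons.mp hq with rfl | hq
      · right; omega
      · right; exact lt_of_lt_of_le (by omega) (hp q hq)


-- ===== VERDICT (by name: the statement is the Claim_ definition above) =====
theorem merge_ranges_if_possible_spec : Claim_equal_merge_ranges_if_possible := by
  intro ranges _
  unfold Spec_merge_ranges_if_possible merge_ranges_if_possible merge_ranges_if_possible_alt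
  by_cases hr : ranges = []
  · simp [hr]
  rw [if_neg hr, if_neg hr]
  set rs := ranges.map (fun p => ((min p.1 p.2 : Int), (max p.1 p.2 : Int))) with hrs
  have hrsne : rs ≠ [] := by simp [hrs, hr]
  have hnorm : ∀ p ∈ rs, p.1 ≤ p.2 := by
    intro p hp
    rcases List.mem_map.mp hp with ⟨q, _, rfl⟩
    exact le_trans (min_le_left _ _) (le_max_left _ _)
  have hperm : (PySem.List.sorted2 rs Prod.fst Prod.snd).Perm rs :=
    PySem.List.sorted2_perm rs Prod.fst Prod.snd false
  have hpw0 := pv_sorted2_pw rs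
  cases hs : PySem.List.sorted2 rs Prod.fst Prod.snd with
  | nil =>
    rw [hs] at hperm
    exact absurd (List.perm_nil.mp hperm.symm) hrsne
  | cons hd t =>
    obtain ⟨cs, ce0⟩ := hd
    rw [hs] at hperm hpw0
    have hmem : ∀ p : Int × Int, p ∈ (cs, ce0) :: t ↔ p ∈ rs := fun p => hperm.mem_iff
    rcases List.pairwise_cons.mp hpw0 with ⟨hhead, htail⟩
    have hpw1 : ∀ q ∈ t, cs ≤ q.1 := fun q hq => pvLex_fst_le (hhead q hq)
    have hpwt : t.Pairwise (fun a b => a.1 ≤ b.1) := htail.imp pvLex_fst_le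
    -- min / max of the normalized bounds
    have hfne : rs.map Prod.fst ≠ [] := by simpa using hrsne
    have hsne : rs.map Prod.snd ≠ [] := by simpa using hrsne
    cases hmin : PySem.List.min? (rs.map Prod.fst) (fun x => x) with
    | none => exact absurd ((PySem.List.min?_eq_none_iff _ _).mp hmin) hfne
    | some lo =>
    cases hmax : PySem.List.max? (rs.map Prod.snd) (fun x => x) with
    | none => exact absurd ((PySem.List.max?_eq_none_iff _ _).mp hmax) hsne
    | some hi =>
    have hlo_min : ∀ y ∈ rs.map Prod.fst, lo ≤ y := PySem.List.min?_isMin hmin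
    have hlo_mem : lo ∈ rs.map Prod.fst := PySem.List.min?_mem hmin
    have hhi_max : ∀ y ∈ rs.map Prod.snd, y ≤ hi := PySem.List.max?_isMax hmax
    have hhi_mem : hi ∈ rs.map Prod.snd := PySem.List.max?_mem hmax
    have hcs_mem : ((cs, ce0) : Int × Int) ∈ rs := (hmem _).mp List.mem_cons_self
    have hcs_le : ∀ p ∈ rs, cs ≤ p.1 := by
      intro p hp
      rcases List.mem_cons.mp ((hmem p).mpr hp) with rfl | hp'
      · exact le_refl _
      · exact hpw1 p hp'
    have hcslo : cs = lo := by
      rcases List.mem_map.mp hlo_mem with ⟨p, hp, rfl⟩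
      exact le_antisymm (hcs_le p hp) (hlo_min cs (List.mem_map_of_mem hcs_mem))
    have hce0 : cs ≤ ce0 := hnorm _ hcs_mem
    cases hA : pvGoA ce0 t with
    | some c =>
      simp only [hmin, hmax, hA]
      obtain ⟨hcec, hcfold, hcov⟩ := pvGoA_some t ce0 c hA
      have hfold' : c = (t.map Prod.snd).foldl max ce0 := by
        rw [hcfold, List.foldl_map]
      have hub := PySem.List.le_foldl_max (t.map Prod.snd) ce0
      have hcin : c ∈ rs.map Prod.snd := by
        rcases PySem.List.foldl_max_mem (t.map Prod.snd) ce0 with hm | hm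
        · rw [hfold', hm]
          exact List.mem_map_of_mem hcs_mem
        · rw [hfold'] at *
          rcases List.mem_map.mp hm with ⟨q, hq, hqe⟩
          rw [← hqe]
          exact List.mem_map_of_mem ((hmem q).mp (List.mem_cons_of_mem _ hq))
      have hchi : c = hi := by
        refine le_antisymm (hhi_max c hcin) ?_
        rcases List.mem_map.mp hhi_mem with ⟨p, hp, rfl⟩
        rcases List.mem_cons.mp ((hmem p).mpr hp) with rfl | hp'
        · exact le_trans (le_refl _) hcec
        · rw [hfold']
          exact hub.2 p.2 (List.mem_map_of_mem hp')
      rw [if_pos]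
      · rw [hcslo, hchi]
      · simp only [List.all_eq_true, List.any_eq_true, Bool.or_eq_true, Bool.and_eq_true,
          decide_eq_true_eq]
        intro p hp
        by_cases hph : p.2 < hi
        · right
          by_cases hpc : p.2 + 1 ≤ ce0
          · exact ⟨(cs, ce0), hcs_mem, by
              have := hcs_le p hp
              have := hnorm p hp
              constructor <;> simp <;> omega⟩
          · rcases hcov (p.2 + 1) (by omega) (by omega) with ⟨q, hq, hq1, hq2⟩
            exact ⟨q, (hmem q).mp (List.mem_cons_of_mem _ hq), hq1, hq2⟩
        · left; omega
    | none =>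
      simp only [hmin, hmax, hA]
      obtain ⟨g, hg1, hg2, ⟨q0, hq0, hq0'⟩, hg4⟩ := pvGoA_none t ce0 hA hpwt
      have hq0rs : q0 ∈ rs := (hmem q0).mp (List.mem_cons_of_mem _ hq0)
      have hghi : g ≤ hi := by
        have h1 : q0.2 ≤ hi := hhi_max q0.2 (List.mem_map_of_mem hq0rs)
        have h2 : q0.1 ≤ q0.2 := hnorm q0 hq0rs
        omega
      have hunc : ∀ q ∈ rs, q.2 < g ∨ g < q.1 := by
        intro q hq
        rcases List.mem_cons.mp ((hmem q).mpr hq) with rfl | hq'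
        · left; exact hg1
        · exact hg4 q hq'
      obtain ⟨p, hp, hpg⟩ : ∃ p ∈ rs, g = p.2 + 1 := by
        rcases hg2 with rfl | ⟨p, hp, hpg⟩
        · exact ⟨(cs, ce0), hcs_mem, rfl⟩
        · exact ⟨p, (hmem p).mp (List.mem_cons_of_mem _ hp), hpg⟩
      have hcondF : ¬ ((rs.all fun p => decide (hi ≤ p.2) ||
          rs.any fun q => decide (q.1 ≤ p.2 + 1) && decide (p.2 + 1 ≤ q.2)) = true) := by
        simp only [List.all_eq_true, List.any_eq_true, Bool.or_eq_true, Bool.and_eq_true,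
          decide_eq_true_eq]
        push Not
        exact ⟨p, hp, by omega, fun q hq => by rcases hunc q hq with h | h <;> omega⟩
      rw [if_neg hcondF]
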